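-- pv_equiv track=rewrite | github.com/Sallyrideauto/codetree-TILs | 240818/xor 결과 최대 만들기/max-of-xor.py | find_max_xor
-- ===== SOURCE A (Python) =====
-- from itertools import combinations
--
-- def find_max_xor(n, m, arr):
--     max_xor = 0
--
--     # m개의 숫자를 뽑을 수 있는 모든 조합 생성
--     for comb in combinations(arr, m):
--         # 현재 조합의 XOR 값 계산
--         current_xor = 0
--         for num in comb:
--             current_xor ^= num
--
--         # 최대값 갱신
--         if current_xor > max_xor:
--             max_xor = current_xor
--
--     return max_xor
-- ===== SOURCE B (Python) =====
-- def find_max_xor(n, m, arr):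
--     best = 0
--
--     def dfs(i, count, acc):
--         nonlocal best
--         if count == m:
--             if acc > best:
--                 best = acc
--             return
--         if i == len(arr):
--             return
--         dfs(i + 1, count + 1, acc ^ arr[i])
--         dfs(i + 1, count, acc)
--
--     dfs(0, 0, 0)
--     return best
-- ===== Notes on version B (the rewrite author's own statement) =====
-- stated objective: alternative
-- what changed: Replaces the itertools.combinations generator plus inner XOR loop by a recursive include/skip DFS over indices that maintains the partial XOR and a running best.
import Mathlib
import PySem

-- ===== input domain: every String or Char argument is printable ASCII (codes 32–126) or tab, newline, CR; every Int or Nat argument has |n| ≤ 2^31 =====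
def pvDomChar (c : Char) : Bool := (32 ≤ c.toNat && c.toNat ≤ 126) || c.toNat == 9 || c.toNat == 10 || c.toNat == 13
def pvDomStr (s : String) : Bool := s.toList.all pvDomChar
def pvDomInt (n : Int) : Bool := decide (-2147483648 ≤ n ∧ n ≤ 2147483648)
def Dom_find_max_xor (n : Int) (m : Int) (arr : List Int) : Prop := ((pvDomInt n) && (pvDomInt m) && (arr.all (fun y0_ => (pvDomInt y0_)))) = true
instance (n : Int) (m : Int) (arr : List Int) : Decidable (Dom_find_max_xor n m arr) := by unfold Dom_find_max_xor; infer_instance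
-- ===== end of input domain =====

-- B replaces the combinations enumeration by an include/skip DFS carrying the partial XOR (alternative decomposition, same cost).

-- ===== PORT A =====
-- itertools.combinations(arr, m) in its lexicographic-by-index order
def pvCombs : Nat → List Int → List (List Int)
  | 0, _ => [[]]
  | _ + 1, [] => []
  | k + 1, x :: rest => (pvCombs k rest).map (x :: ·) ++ pvCombs (k + 1) rest

def find_max_xor (n : Int) (m : Int) (arr : List Int) : Int :=
  (pvCombs m.toNat arr).foldl
    (fun max_xor comb =>
      let current_xor := comb.foldl (fun a b => PySem.Int.bxor a b) 0
      if current_xor > max_xor then current_xor else max_xor) 0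

-- ===== PORT B =====
-- dfs(i, count, acc) with the running best threaded as state; include branch first, then skip
def pvDfs (m : Int) (l : List Int) (count acc best : Int) : Int :=
  if count = m then (if acc > best then acc else best)
  else
    match l with
    | [] => best
    | x :: rest => pvDfs m rest count acc (pvDfs m rest (count + 1) (PySem.Int.bxor acc x) best)

def find_max_xor_alt (n : Int) (m : Int) (arr : List Int) : Int :=
  pvDfs m arr 0 0 0

-- ===== PRECONDITION & SPEC =====
-- A raises ValueError for m < 0 (combinations rejects negative r); those inputs are excluded.
def Pre_find_max_xor (n : Int) (m : Int) (arr : List Int) : Prop := 0 ≤ m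
instance (n : Int) (m : Int) (arr : List Int) : Decidable (Pre_find_max_xor n m arr) := by unfold Pre_find_max_xor; infer_instance
def pvWitness_find_max_xor : Int × Int × List Int := (3, 2, [1, 2, 3])

def Spec_find_max_xor (n : Int) (m : Int) (arr : List Int) (out : Int) : Prop := out = find_max_xor_alt n m arr
instance (n : Int) (m : Int) (arr : List Int) (out : Int) : Decidable (Spec_find_max_xor n m arr out) := by unfold Spec_find_max_xor; infer_instance

-- ===== CLAIM =====
def Claim_equal_find_max_xor : Prop := ∀ (n : Int) (m : Int) (arr : List Int), Dom_find_max_xor n m arr → Pre_find_max_xor n m arr → Spec_find_max_xor n m arr (find_max_xor n m arr)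

-- ===== LEMMAS AND PROOFS =====

-- DFS invariant: with count ≤ m, pvDfs folds A's max-update over the remaining combinations,
-- with the partial XOR acc seeding the inner fold and best as the accumulator.
theorem pvDfs_eq (m : Int) (l : List Int) :
    ∀ (count acc best : Int), count ≤ m →
      pvDfs m l count acc best =
        (pvCombs (m - count).toNat l).foldl
          (fun b c =>
            let cx := c.foldl (fun a b => PySem.Int.bxor a b) acc
            if cx > b then cx else b) best := by
  induction l with
  | nil =>
    intro count acc best h
    rw [pvDfs.eq_def]
    by_cases hc : count = m
    · have : (m - count).toNat = 0 := by omega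
      simp [hc, pvCombs, List.foldl]
    · have : (m - count).toNat = ((m - count).toNat - 1) + 1 := by omega
      simp only [hc, if_false]
      rw [this, pvCombs]
      simp [List.foldl]
  | cons x rest ih =>
    intro count acc best h
    rw [pvDfs.eq_def]
    by_cases hc : count = m
    · have : (m - count).toNat = 0 := by omega
      simp [hc, pvCombs, List.foldl]
    · have hk : (m - count).toNat = (m - (count + 1)).toNat + 1 := by omega
      simp only [hc, if_false]
      rw [hk, pvCombs, List.foldl_append, List.foldl_map]
      rw [ih (count + 1) (PySem.Int.bxor acc x) best (by omega), ih count acc _ (by omega), hk]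
      rfl

-- ===== VERDICT =====
theorem find_max_xor_spec : Claim_equal_find_max_xor := by
  intro n m arr _ hpre
  unfold Spec_find_max_xor find_max_xor find_max_xor_alt
  rw [pvDfs_eq m arr 0 0 0 hpre]
  simp
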